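-- pv_equiv track=rewrite | github.com/InfinityBowman/paleo-waifu | python/scripts/scrape_creatures.py | parse_csv_period
-- ===== SOURCE A (Python) =====
-- def parse_csv_period(period_str: str) -> tuple[str | None, str | None]:
--     """Parse NHM CSV period string like 'Late Cretaceous 74-70 million years ago'."""
--     if not period_str:
--         return None, None
--
--     text = period_str.lower()
--
--     period_map = [
--         ("late cretaceous", ("Cretaceous", "Late Cretaceous")),
--         ("early cretaceous", ("Cretaceous", "Early Cretaceous")),
--         ("cretaceous", ("Cretaceous", None)),
--         ("late jurassic", ("Jurassic", "Late Jurassic")),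
--         ("middle jurassic", ("Jurassic", "Middle Jurassic")),
--         ("early jurassic", ("Jurassic", "Early Jurassic")),
--         ("jurassic", ("Jurassic", None)),
--         ("late triassic", ("Triassic", "Late Triassic")),
--         ("middle triassic", ("Triassic", "Middle Triassic")),
--         ("early triassic", ("Triassic", "Early Triassic")),
--         ("triassic", ("Triassic", None)),
--         ("late permian", ("Permian", "Late Permian")),
--         ("permian", ("Permian", None)),
--         ("carboniferous", ("Carboniferous", None)),
--         ("devonian", ("Devonian", None)),
--         ("silurian", ("Silurian", None)),
--         ("ordovician", ("Ordovician", None)),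
--         ("cambrian", ("Cambrian", None)),
--     ]
--
--     for keyword, (era, period) in period_map:
--         if keyword in text:
--             return era, period
--
--     return None, None
-- ===== SOURCE B (Python) =====
-- _ERAS = [
--     ("Cretaceous", ["Late", "Early"]),
--     ("Jurassic", ["Late", "Middle", "Early"]),
--     ("Triassic", ["Late", "Middle", "Early"]),
--     ("Permian", ["Late"]),
--     ("Carboniferous", []),
--     ("Devonian", []),
--     ("Silurian", []),
--     ("Ordovician", []),
--     ("Cambrian", []),
-- ]
--
--
-- def parse_csv_period(period_str):
--     """Era-first lookup: find the era name in the text, then its modifier phrase."""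
--     if not period_str:
--         return None, None
--     text = period_str.lower()
--     for era, mods in _ERAS:
--         if era.lower() in text:
--             for mod in mods:
--                 if " ".join((mod, era)).lower() in text:
--                     return era, " ".join((mod, era))
--             return era, None
--     return None, None
-- ===== Notes on version B (the rewrite author's own statement) =====
-- stated objective: simpler
-- what changed: Replaces A's flat 18-entry keyword->result table scanned linearly by an era-first decomposition: a 9-entry table of era names with their ordered modifier lists; B finds the era name first, then the modifier phrase, building the returned period string from its parts.
import Mathlib
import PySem

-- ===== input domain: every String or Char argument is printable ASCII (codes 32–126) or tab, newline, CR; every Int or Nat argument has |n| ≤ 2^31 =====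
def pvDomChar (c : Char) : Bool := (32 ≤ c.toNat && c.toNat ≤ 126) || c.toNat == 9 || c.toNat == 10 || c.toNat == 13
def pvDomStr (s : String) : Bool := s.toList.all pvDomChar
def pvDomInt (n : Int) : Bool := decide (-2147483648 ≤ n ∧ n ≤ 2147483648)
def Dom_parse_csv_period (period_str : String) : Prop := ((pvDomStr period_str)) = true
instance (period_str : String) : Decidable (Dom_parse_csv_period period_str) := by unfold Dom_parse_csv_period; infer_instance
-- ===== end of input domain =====

-- B replaces A's flat 18-entry keyword list by an era-first decomposition (9 eras, each
-- with its ordered modifier list); objective: simpler/alternative, same cost.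

-- ===== PORT A =====
-- A's literal period_map (keyword → (era, period)), in A's order.
def pvPeriodMap : List (String × (Option String × Option String)) :=
  [("late cretaceous", (some "Cretaceous", some "Late Cretaceous")),
   ("early cretaceous", (some "Cretaceous", some "Early Cretaceous")),
   ("cretaceous", (some "Cretaceous", none)),
   ("late jurassic", (some "Jurassic", some "Late Jurassic")),
   ("middle jurassic", (some "Jurassic", some "Middle Jurassic")),
   ("early jurassic", (some "Jurassic", some "Early Jurassic")),
   ("jurassic", (some "Jurassic", none)),
   ("late triassic", (some "Triassic", some "Late Triassic")),
   ("middle triassic", (some "Triassic", some "Middle Triassic")),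
   ("early triassic", (some "Triassic", some "Early Triassic")),
   ("triassic", (some "Triassic", none)),
   ("late permian", (some "Permian", some "Late Permian")),
   ("permian", (some "Permian", none)),
   ("carboniferous", (some "Carboniferous", none)),
   ("devonian", (some "Devonian", none)),
   ("silurian", (some "Silurian", none)),
   ("ordovician", (some "Ordovician", none)),
   ("cambrian", (some "Cambrian", none))]

-- A's 'for keyword, (era, period) in period_map: if keyword in text: return era, period'
def pvScanA (text : String) : List (String × (Option String × Option String)) → Option String × Option String
  | [] => (none, none)
  | (kw, res) :: rest => if PySem.Str.isIn kw text then res else pvScanA text rest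

def parse_csv_period (period_str : String) : Option String × Option String :=
  if period_str = "" then (none, none)
  else pvScanA (PySem.Str.lower period_str) pvPeriodMap

-- ===== PORT B =====
-- B's era table: era name → ordered modifier list.
def pvEras : List (String × List String) :=
  [("Cretaceous", ["Late", "Early"]),
   ("Jurassic", ["Late", "Middle", "Early"]),
   ("Triassic", ["Late", "Middle", "Early"]),
   ("Permian", ["Late"]),
   ("Carboniferous", []),
   ("Devonian", []),
   ("Silurian", []),
   ("Ordovician", []),
   ("Cambrian", [])]

-- B's inner loop: 'for mod in mods: if " ".join((mod, era)).lower() in text: return era, " ".join((mod, era))'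
def pvModLoop (text era : String) : List String → Option String × Option String
  | [] => (some era, none)
  | m :: ms =>
      if PySem.Str.isIn (PySem.Str.lower (PySem.Str.join " " [m, era])) text then
        (some era, some (PySem.Str.join " " [m, era]))
      else pvModLoop text era ms

-- B's outer loop: 'for era, mods in _ERAS: if era.lower() in text: …'
def pvEraLoop (text : String) : List (String × List String) → Option String × Option String
  | [] => (none, none)
  | (era, mods) :: rest =>
      if PySem.Str.isIn (PySem.Str.lower era) text then pvModLoop text era mods
      else pvEraLoop text rest

def parse_csv_period_alt (period_str : String) : Option String × Option String :=
  if period_str = "" then (none, none)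
  else pvEraLoop (PySem.Str.lower period_str) pvEras

-- ===== PRECONDITION & SPEC =====
def Spec_parse_csv_period (period_str : String) (out : Option String × Option String) : Prop := out = parse_csv_period_alt period_str
instance (period_str : String) (out : Option String × Option String) : Decidable (Spec_parse_csv_period period_str out) := by unfold Spec_parse_csv_period; infer_instance

-- ===== CLAIM (what is proved, stated in full; the proofs are below) =====
def Claim_equal_parse_csv_period : Prop := ∀ (period_str : String), Dom_parse_csv_period period_str → Spec_parse_csv_period period_str (parse_csv_period period_str)

-- ===== LEMMAS AND PROOFS =====

-- if a keyword is absent from the text, every longer phrase containing it is absent too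
lemma pvMonoF (sub e t : String) (h : e.toList <:+: sub.toList)
    (he : PySem.Str.isIn e t = false) : PySem.Str.isIn sub t = false := by
  cases hs : PySem.Str.isIn sub t
  · rfl
  · rw [PySem.Str.isIn_iff_infix] at hs
    have := (PySem.Str.isIn_iff_infix e t).mpr (h.trans hs)
    rw [he] at this; exact absurd this (by simp)

-- literal normalizations of B's computed strings (all definitional)
@[simp] lemma pvJ1 : PySem.Str.join " " ["Late", "Cretaceous"] = "Late Cretaceous" := rfl
@[simp] lemma pvJ2 : PySem.Str.join " " ["Early", "Cretaceous"] = "Early Cretaceous" := rfl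
@[simp] lemma pvJ3 : PySem.Str.join " " ["Late", "Jurassic"] = "Late Jurassic" := rfl
@[simp] lemma pvJ4 : PySem.Str.join " " ["Middle", "Jurassic"] = "Middle Jurassic" := rfl
@[simp] lemma pvJ5 : PySem.Str.join " " ["Early", "Jurassic"] = "Early Jurassic" := rfl
@[simp] lemma pvJ6 : PySem.Str.join " " ["Late", "Triassic"] = "Late Triassic" := rfl
@[simp] lemma pvJ7 : PySem.Str.join " " ["Middle", "Triassic"] = "Middle Triassic" := rfl
@[simp] lemma pvJ8 : PySem.Str.join " " ["Early", "Triassic"] = "Early Triassic" := rfl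
@[simp] lemma pvJ9 : PySem.Str.join " " ["Late", "Permian"] = "Late Permian" := rfl
@[simp] lemma pvL1 : PySem.Str.lower "Late Cretaceous" = "late cretaceous" := rfl
@[simp] lemma pvL2 : PySem.Str.lower "Early Cretaceous" = "early cretaceous" := rfl
@[simp] lemma pvL3 : PySem.Str.lower "Late Jurassic" = "late jurassic" := rfl
@[simp] lemma pvL4 : PySem.Str.lower "Middle Jurassic" = "middle jurassic" := rfl
@[simp] lemma pvL5 : PySem.Str.lower "Early Jurassic" = "early jurassic" := rfl
@[simp] lemma pvL6 : PySem.Str.lower "Late Triassic" = "late triassic" := rfl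
@[simp] lemma pvL7 : PySem.Str.lower "Middle Triassic" = "middle triassic" := rfl
@[simp] lemma pvL8 : PySem.Str.lower "Early Triassic" = "early triassic" := rfl
@[simp] lemma pvL9 : PySem.Str.lower "Late Permian" = "late permian" := rfl
@[simp] lemma pvE1 : PySem.Str.lower "Cretaceous" = "cretaceous" := rfl
@[simp] lemma pvE2 : PySem.Str.lower "Jurassic" = "jurassic" := rfl
@[simp] lemma pvE3 : PySem.Str.lower "Triassic" = "triassic" := rfl
@[simp] lemma pvE4 : PySem.Str.lower "Permian" = "permian" := rfl
@[simp] lemma pvE5 : PySem.Str.lower "Carboniferous" = "carboniferous" := rfl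
@[simp] lemma pvE6 : PySem.Str.lower "Devonian" = "devonian" := rfl
@[simp] lemma pvE7 : PySem.Str.lower "Silurian" = "silurian" := rfl
@[simp] lemma pvE8 : PySem.Str.lower "Ordovician" = "ordovician" := rfl
@[simp] lemma pvE9 : PySem.Str.lower "Cambrian" = "cambrian" := rfl

-- the heart of the proof: A's flat scan equals B's era-first scan on any text
lemma pvKey (t : String) : pvScanA t pvPeriodMap = pvEraLoop t pvEras := by
  cases h1 : PySem.Str.isIn "cretaceous" t with
  | true => simp at h1; simp [pvScanA, pvEraLoop, pvModLoop, pvPeriodMap, pvEras, h1]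
  | false =>
  have a1 := pvMonoF "late cretaceous" "cretaceous" t (by decide) h1
  have a2 := pvMonoF "early cretaceous" "cretaceous" t (by decide) h1
  simp at h1 a1 a2
  cases h2 : PySem.Str.isIn "jurassic" t with
  | true => simp at h2; simp [pvScanA, pvEraLoop, pvModLoop, pvPeriodMap, pvEras, h1, a1, a2, h2]
  | false =>
  have b1 := pvMonoF "late jurassic" "jurassic" t (by decide) h2
  have b2 := pvMonoF "middle jurassic" "jurassic" t (by decide) h2
  have b3 := pvMonoF "early jurassic" "jurassic" t (by decide) h2
  simp at h2 b1 b2 b3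
  cases h3 : PySem.Str.isIn "triassic" t with
  | true => simp at h3; simp [pvScanA, pvEraLoop, pvModLoop, pvPeriodMap, pvEras, h1, a1, a2, h2, b1, b2, b3, h3]
  | false =>
  have c1 := pvMonoF "late triassic" "triassic" t (by decide) h3
  have c2 := pvMonoF "middle triassic" "triassic" t (by decide) h3
  have c3 := pvMonoF "early triassic" "triassic" t (by decide) h3
  simp at h3 c1 c2 c3
  cases h4 : PySem.Str.isIn "permian" t with
  | true => simp at h4; simp [pvScanA, pvEraLoop, pvModLoop, pvPeriodMap, pvEras, h1, a1, a2, h2, b1, b2, b3, h3, c1, c2, c3, h4]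
  | false =>
  have d1 := pvMonoF "late permian" "permian" t (by decide) h4
  simp at h4 d1
  simp [pvScanA, pvEraLoop, pvModLoop, pvPeriodMap, pvEras, h1, a1, a2, h2, b1, b2, b3, h3, c1, c2, c3, h4, d1]

-- ===== VERDICT (by name: the statement is the Claim_ definition above) =====
theorem parse_csv_period_spec : Claim_equal_parse_csv_period := by
  intro s _
  unfold Spec_parse_csv_period parse_csv_period parse_csv_period_alt
  by_cases hs : s = "" <;> simp [hs, pvKey]
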